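-- pv_equiv track=rewrite | github.com/helloWorld141/google-foobar | free_the_bunny_workers.py | bits_to_buns
-- ===== SOURCE A (Python) =====
-- def bits_to_buns(bits):
--     n = len(bits)
--     b = len(bits[0])
--     buns = list()
--     for i in range(b):
--         bun = list()
--         for j in range(n):
--             if bits[j][i]:
--                 bun.append(j)
--         buns.append(bun)
--     return buns
-- ===== SOURCE B (Python) =====
-- def bits_to_buns(bits):
--     b = len(bits[0])
--
--     def go(j):
--         if j == len(bits):
--             return [[] for _ in range(b)]
--         tails = go(j + 1)
--         row = bits[j]
--         return [[j] + t if row[i] else t for i, t in enumerate(tails)]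
--
--     return go(0)
-- ===== Notes on version B (the rewrite author's own statement) =====
-- stated objective: alternative
-- what changed: Replaces A's iterative column-by-column gather (for each of b columns, scan all n rows appending indices) by a recursion over row indices that builds all b column lists back-to-front, merging each row into the recursively computed tails by prepending the row index where the bit is set.
import Mathlib
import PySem

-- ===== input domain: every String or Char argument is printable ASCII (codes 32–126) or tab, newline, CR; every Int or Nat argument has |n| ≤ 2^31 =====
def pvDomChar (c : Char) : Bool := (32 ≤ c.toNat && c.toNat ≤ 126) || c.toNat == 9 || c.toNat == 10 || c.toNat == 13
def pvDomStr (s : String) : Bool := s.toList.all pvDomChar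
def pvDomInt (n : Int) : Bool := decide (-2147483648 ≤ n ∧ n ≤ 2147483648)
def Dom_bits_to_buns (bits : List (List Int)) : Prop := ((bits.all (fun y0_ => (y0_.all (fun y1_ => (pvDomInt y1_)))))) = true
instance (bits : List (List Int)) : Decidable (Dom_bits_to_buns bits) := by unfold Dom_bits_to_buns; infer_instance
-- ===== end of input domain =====

-- B replaces A's iterative column-by-column gather by a recursion over row indices that
-- builds all column lists back-to-front, prepending the row index where a bit is set
-- (objective: alternative decomposition, same asymptotic cost).

-- ===== PORT A =====
def bits_to_buns (bits : List (List Int)) : List (List Int) :=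
  let n : Int := bits.length
  let b : Int := ((PySem.List.pyGet? bits 0).getD []).length
  (PySem.List.pyRange 0 b).foldl (fun buns i =>
    buns ++ [(PySem.List.pyRange 0 n).foldl (fun bun j =>
      if PySem.List.pyGetD (PySem.List.pyGetD bits j []) i 0 ≠ 0 then bun ++ [j] else bun) []]) []

-- ===== PORT B =====
-- go(j): the decidable guard 'j < len(bits)' (vs Python's 'j == len(bits)') only makes the
-- same recursion total; on the reachable j ≤ len(bits) the two tests coincide.
def bitsToBunsGo (bits : List (List Int)) (b : Int) (j : Nat) : List (List Int) :=
  if h : j < bits.length then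
    let tails := bitsToBunsGo bits b (j + 1)
    let row := PySem.List.pyGetD bits (j : Int) []
    (PySem.List.enumerate tails 0).map (fun p =>
      if PySem.List.pyGetD row p.1 0 ≠ 0 then (j : Int) :: p.2 else p.2)
  else
    (PySem.List.pyRange 0 b).map (fun _ => ([] : List Int))
termination_by bits.length - j

def bits_to_buns_alt (bits : List (List Int)) : List (List Int) :=
  let b : Int := ((PySem.List.pyGet? bits 0).getD []).length
  bitsToBunsGo bits b 0

-- ===== PRECONDITION & SPEC =====
-- Pre_ excludes exactly the inputs where Python A raises IndexError: empty bits
-- (bits[0]) or some row shorter than the first row (bits[j][i]).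
def Pre_bits_to_buns (bits : List (List Int)) : Prop :=
  bits ≠ [] ∧ ∀ r ∈ bits, ((bits.headD []).length ≤ r.length)
instance (bits : List (List Int)) : Decidable (Pre_bits_to_buns bits) := by unfold Pre_bits_to_buns; infer_instance
def pvWitness_bits_to_buns : List (List Int) := [[1, 0], [0, 2], [1, 1]]

def Spec_bits_to_buns (bits : List (List Int)) (out : List (List Int)) : Prop := out = bits_to_buns_alt bits
instance (bits : List (List Int)) (out : List (List Int)) : Decidable (Spec_bits_to_buns bits out) := by unfold Spec_bits_to_buns; infer_instance

-- ===== CLAIM (what is proved, stated in full; the proofs are below) =====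
def Claim_equal_bits_to_buns : Prop := ∀ (bits : List (List Int)), Dom_bits_to_buns bits → Pre_bits_to_buns bits → Spec_bits_to_buns bits (bits_to_buns bits)

-- ===== LEMMAS AND PROOFS =====

-- the per-row merge step: mapping the merge over an enumerated map-of-range is a map over the range
theorem pv_merge_map_range (bN : Nat) (f : Nat → List Int) (g : Int → List Int → List Int) :
    (PySem.List.enumerate ((List.range bN).map f) 0).map (fun p => g p.1 p.2)
      = (List.range bN).map (fun (i : Nat) => g (i : Int) (f i)) := by
  apply List.ext_getElem
  · simp [PySem.List.length_enumerate]
  · intro k h1 h2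
    simp only [List.getElem_map, PySem.List.getElem_enumerate, List.getElem_range]
    norm_num

-- the recursion builds, for each column i, the filter of the remaining row indices
theorem pv_goB (bits : List (List Int)) (bN : Nat) :
    ∀ (fuel j : Nat), j + fuel = bits.length →
    bitsToBunsGo bits (bN : Int) j
      = (List.range bN).map (fun (i : Nat) =>
          (PySem.List.pyRange (j : Int) (bits.length : Int)).filter
            (fun k => decide (PySem.List.pyGetD (PySem.List.pyGetD bits k []) (i : Int) 0 ≠ 0))) := by
  intro fuel
  induction fuel with
  | zero =>
    intro j hj
    rw [bitsToBunsGo]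
    have hj' : ¬ j < bits.length := by omega
    rw [dif_neg hj']
    have : ((j : Int)) = (bits.length : Int) := by omega
    rw [this, PySem.List.pyRange_one_eq_nil (a := (bits.length : Int)) (b := (bits.length : Int)) (by omega)]
    rw [PySem.List.pyRange_zero_nat, List.map_map]
    simp [Function.comp_def]
  | succ m ih =>
    intro j hj
    rw [bitsToBunsGo]
    have hj' : j < bits.length := by omega
    rw [dif_pos hj']
    rw [ih (j + 1) (by omega)]
    push_cast
    rw [pv_merge_map_range bN
      (fun (i : Nat) => (PySem.List.pyRange ((j : Int) + 1) (bits.length : Int)).filter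
        (fun k => decide (PySem.List.pyGetD (PySem.List.pyGetD bits k []) (i : Int) 0 ≠ 0)))
      (fun a t => if PySem.List.pyGetD (PySem.List.pyGetD bits (j : Int) []) a 0 ≠ 0 then (j : Int) :: t else t)]
    apply List.map_congr_left
    intro i _
    have hcons : PySem.List.pyRange (j : Int) (bits.length : Int)
        = (j : Int) :: PySem.List.pyRange ((j : Int) + 1) (bits.length : Int) := by
      exact PySem.List.pyRange_one_cons (by exact_mod_cast hj')
    rw [hcons, List.filter_cons]
    split_ifs with h1 h2 h2 <;> simp_all

-- ===== VERDICT (by name: the statement is the Claim_ definition above) =====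
theorem bits_to_buns_spec : Claim_equal_bits_to_buns := by
  intro bits _ _
  unfold Spec_bits_to_buns bits_to_buns bits_to_buns_alt
  set bN : Nat := ((PySem.List.pyGet? bits 0).getD []).length with hbN
  -- B side: the recursion from j = 0 is the map of column filters
  rw [pv_goB bits bN bits.length 0 (by omega)]
  -- A side: the outer append-singleton fold is a map, the inner append-if fold a filter
  rw [PySem.List.foldl_append_singleton_eq_map, List.nil_append]
  have hAim : (PySem.List.pyRange 0 (bN : Int)).map (fun i =>
        (PySem.List.pyRange 0 (bits.length : Int)).foldl (fun bun j =>
          if PySem.List.pyGetD (PySem.List.pyGetD bits j []) i 0 ≠ 0 then bun ++ [j] else bun) [])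
      = (PySem.List.pyRange 0 (bN : Int)).map (fun i =>
        (PySem.List.pyRange 0 (bits.length : Int)).filter
          (fun j => decide (PySem.List.pyGetD (PySem.List.pyGetD bits j []) i 0 ≠ 0))) := by
    apply List.map_congr_left
    intro i _
    rw [PySem.List.foldl_append_ite_eq_filter
      (fun j => PySem.List.pyGetD (PySem.List.pyGetD bits j []) i 0 ≠ 0)]
    simp
  rw [hAim, PySem.List.pyRange_zero_nat bN, List.map_map]
  apply List.map_congr_left
  intro i _
  norm_num
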